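-- pv_equiv track=rewrite | github.com/Shoaib-Bin-Rashid/WordXploitBD | wordxploitbd.py | smart_leetify
-- ===== SOURCE A (Python) =====
-- def smart_leetify(word):
--     leet_map = {'a': '@', 'i': '1', 'e': '3', 'o': '0', 's': '$'}
--     result = []
--     replaced = set()
--     for c in word:
--         if c in leet_map and c not in replaced:
--             result.append(leet_map[c])
--             replaced.add(c)
--         else:
--             result.append(c)
--     return ''.join(result)
-- ===== SOURCE B (Python) =====
-- def smart_leetify(word):
--     leet_map = {'a': '@', 'i': '1', 'e': '3', 'o': '0', 's': '$'}
--     for k, v in leet_map.items():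
--         word = word.replace(k, v, 1)
--     return word
-- ===== Notes on version B (the rewrite author's own statement) =====
-- stated objective: idiomatic
-- what changed: Replaces the single stateful per-character pass (result list + replaced-set bookkeeping) with one str.replace(k, v, 1) call per leet character; exact because the substitution values are disjoint from the keys, so the five scans are independent and order-irrelevant.
import Mathlib
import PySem

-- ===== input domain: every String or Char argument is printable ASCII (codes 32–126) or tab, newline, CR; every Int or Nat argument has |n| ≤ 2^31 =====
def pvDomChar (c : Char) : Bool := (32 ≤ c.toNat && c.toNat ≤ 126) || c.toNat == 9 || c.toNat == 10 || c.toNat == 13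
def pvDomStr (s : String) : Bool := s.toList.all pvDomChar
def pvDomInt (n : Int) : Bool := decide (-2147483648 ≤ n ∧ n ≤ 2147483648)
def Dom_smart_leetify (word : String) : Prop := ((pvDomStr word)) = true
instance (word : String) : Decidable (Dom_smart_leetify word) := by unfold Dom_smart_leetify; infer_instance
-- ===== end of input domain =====

-- B replaces A's single stateful pass (result list + replaced-set) by one word.replace(k, v, 1)
-- per leet character; exact because the substitution values are disjoint from the keys.

-- ===== PORT A =====
-- leet_map = {'a': '@', 'i': '1', 'e': '3', 'o': '0', 's': '$'} (single-char keys/values, modelled as Chars)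
def pvLeetMap : PySem.Dict Char Char :=
  PySem.Dict.ofList [('a', '@'), ('i', '1'), ('e', '3'), ('o', '0'), ('s', '$')]

-- the for-loop over the characters of word, with state (result, replaced)
def pvLoopA : List Char → List Char → PySem.Set Char → List Char
  | [], result, _ => result
  | c :: rest, result, replaced =>
    if pvLeetMap.contains c && !(PySem.Set.contains replaced c) then
      -- leet_map[c]: guarded by 'c in leet_map', so get? is some; the getD c default never fires
      pvLoopA rest (result ++ [(pvLeetMap.get? c).getD c]) (PySem.Set.add replaced c)
    else
      pvLoopA rest (result ++ [c]) replaced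

def smart_leetify (word : String) : String :=
  String.mk (pvLoopA word.toList [] PySem.Set.empty)

-- ===== PORT B =====
-- word.replace(k, v, 1) for single-char k, v: hand port, exact — replace the first occurrence of k
def pvReplaceFirst (k v : Char) : List Char → List Char
  | [] => []
  | c :: rest => if c == k then v :: rest else c :: pvReplaceFirst k v rest

def smart_leetify_alt (word : String) : String :=
  String.mk (([('a', '@'), ('i', '1'), ('e', '3'), ('o', '0'), ('s', '$')] : List (Char × Char)).foldl
    (fun w p => pvReplaceFirst p.1 p.2 w) word.toList)

-- ===== PRECONDITION & SPEC =====
def Spec_smart_leetify (word : String) (out : String) : Prop := out = smart_leetify_alt word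
instance (word : String) (out : String) : Decidable (Spec_smart_leetify word out) := by unfold Spec_smart_leetify; infer_instance

-- ===== CLAIM (what is proved, stated in full; the proofs are below) =====
def Claim_equal_smart_leetify : Prop := ∀ (word : String), Dom_smart_leetify word → Spec_smart_leetify word (smart_leetify word)

-- ===== LEMMAS AND PROOFS =====

-- A's pass, with the accumulator peeled off and the replaced set as a plain membership list
def pvGo (S : List Char) : List Char → List Char
  | [] => []
  | c :: t =>
    match pvLeetMap.get? c with
    | some v => if c ∈ S then c :: pvGo S t else v :: pvGo (c :: S) t
    | none => c :: pvGo S t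

-- pvGo only looks at S through membership
theorem pvGo_congr (l : List Char) (S S' : List Char) (h : ∀ x, x ∈ S ↔ x ∈ S') :
    pvGo S l = pvGo S' l := by
  induction l generalizing S S' with
  | nil => rfl
  | cons c t ih =>
    simp only [pvGo]
    cases hg : pvLeetMap.get? c with
    | none => simp [ih S S' h]
    | some v =>
      by_cases hc : c ∈ S
      · simp [hc, (h c).mp hc, ih S S' h]
      · have hc' : c ∉ S' := fun hx => hc ((h c).mpr hx)
        simp [hc, hc', ih (c :: S) (c :: S') (by intro x; simp [h x])]

-- A's loop is pvGo with the accumulator made explicit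
theorem pvLoopA_eq_go (l : List Char) (res : List Char) (S : PySem.Set Char) :
    pvLoopA l res S = res ++ pvGo S l := by
  induction l generalizing res S with
  | nil => simp [pvLoopA, pvGo]
  | cons c t ih =>
    simp only [pvLoopA, pvGo]
    rw [PySem.Dict.contains_eq_isSome_get?]
    cases hg : pvLeetMap.get? c with
    | none =>
      simp only [Option.isSome_none, Bool.false_and, Bool.false_eq_true, if_false]
      rw [ih]
      simp
    | some v =>
      by_cases hc : c ∈ S
      · have h1 : PySem.Set.contains S c = true := by simpa using hc
        simp only [h1, Bool.not_true, Bool.and_false, Bool.false_eq_true, if_false]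
        rw [ih]
        simp [hc]
      · have h1 : PySem.Set.contains S c = false := by simpa using hc
        simp only [h1, Option.isSome_some, Bool.not_false, Bool.and_true, if_true]
        rw [ih, PySem.Set.add_of_not_mem hc,
          pvGo_congr t (S ++ [c]) (c :: S) (by intro x; simp [or_comm])]
        simp [hc]

-- core: replacing the first occurrence of a not-yet-replaced key first, then doing the
-- stateful pass with that key marked replaced, equals the stateful pass itself
theorem pvGo_replaceFirst (l : List Char) (S : List Char) (k v : Char)
    (hk : pvLeetMap.get? k = some v) (hvn : pvLeetMap.get? v = none) (hS : k ∉ S) :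
    pvGo S l = pvGo (k :: S) (pvReplaceFirst k v l) := by
  induction l generalizing S with
  | nil => rfl
  | cons c t ih =>
    by_cases hck : c = k
    · subst hck
      simp [pvReplaceFirst, pvGo, hk, hvn, hS]
    · simp only [pvReplaceFirst, if_neg (by simp [hck] : ¬ ((c == k) = true)), pvGo]
      cases hg : pvLeetMap.get? c with
      | none => simp [ih S hS]
      | some w =>
        by_cases hc : c ∈ S
        · simp [hc, List.mem_cons, hck, ih S hS]
        · have hc' : c ∉ k :: S := by simp [hck, hc]
          simp only [if_neg hc, if_neg hc']
          rw [ih (c :: S) (by simp [Ne.symm hck, hS]),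
            pvGo_congr (pvReplaceFirst k v t) (k :: c :: S) (c :: k :: S)
              (by intro x; simp; tauto)]

-- once every key of the map is in S, the pass is the identity
theorem pvGo_saturated (l : List Char) (S : List Char) (h : ∀ x ∈ pvLeetMap.keys, x ∈ S) :
    pvGo S l = l := by
  induction l with
  | nil => rfl
  | cons c t ih =>
    simp only [pvGo]
    cases hg : pvLeetMap.get? c with
    | none => simp [ih]
    | some v =>
      have h2 : (c, v) ∈ pvLeetMap.items := PySem.Dict.mem_items_of_get?_eq_some _ hg
      have h3 : c ∈ pvLeetMap.keys := PySem.Dict.mem_keys_of_mem_items _ h2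
      have hcS : c ∈ S := h c h3
      simp [hcS, ih]

-- ===== VERDICT (by name: the statement is the Claim_ definition above) =====
theorem smart_leetify_spec : Claim_equal_smart_leetify := by
  intro word _
  show smart_leetify word = smart_leetify_alt word
  unfold smart_leetify smart_leetify_alt
  rw [pvLoopA_eq_go, List.nil_append]
  simp only [List.foldl]
  have he : (PySem.Set.empty : List Char) = [] := rfl
  rw [he, pvGo_replaceFirst _ [] 'a' '@' rfl rfl (by simp),
    pvGo_replaceFirst _ ['a'] 'i' '1' rfl rfl (by simp),
    pvGo_replaceFirst _ ['i', 'a'] 'e' '3' rfl rfl (by simp),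
    pvGo_replaceFirst _ ['e', 'i', 'a'] 'o' '0' rfl rfl (by simp),
    pvGo_replaceFirst _ ['o', 'e', 'i', 'a'] 's' '$' rfl rfl (by simp),
    pvGo_saturated _ _ (by
      rw [show pvLeetMap.keys = ['a', 'i', 'e', 'o', 's'] from rfl]
      intro x hx; fin_cases hx <;> simp)]
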